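-- pv_equiv track=rewrite | github.com/mNandhu/AirSimClient_Python | cli.py | _extract_comment_block
-- ===== SOURCE A (Python) =====
-- def _extract_comment_block(lines: list[str]) -> str | None:
--     """Extract contiguous top-of-file comment lines as description."""
--     desc_lines: list[str] = []
--     started = False
--     for line in lines:
--         s = line.strip()
--         if not started and (
--             s == ""
--             or s.startswith("#!")
--             or s.lower().startswith("# -*-")
--             or s.lower().startswith("# coding")
--         ):
--             continue
--         if s.startswith("#"):
--             started = True
--             # strip leading '# ' or '#'
--             desc_lines.append(s[1:].lstrip())
--         elif started:
--             break
--         else: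
--             # first non-comment content encountered
--             break
--     desc = "\n".join(line for line in desc_lines if line is not None)
--     return desc if desc.strip() else None
-- ===== SOURCE B (Python) =====
-- def _extract_comment_block(lines: list[str]) -> str | None:
--     """Extract contiguous top-of-file comment lines as description."""
--     # Phase 1: drop the leading preamble (blank / shebang / encoding-cookie lines).
--     rest = lines
--     while rest and _is_preamble(rest[0].strip()):
--         rest = rest[1:]
--     # Phase 2: collect the maximal contiguous run of comment lines.
--     parts = []
--     while rest and rest[0].strip().startswith("#"):
--         parts.append(rest[0].strip()[1:].lstrip())
--         rest = rest[1:]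
--     desc = "\n".join(parts)
--     return desc if desc.strip() else None
--
--
-- def _is_preamble(s: str) -> bool:
--     return (
--         s == ""
--         or s.startswith("#!")
--         or s.lower().startswith("# -*-")
--         or s.lower().startswith("# coding")
--     )
-- ===== Notes on version B (the rewrite author's own statement) =====
-- stated objective: simpler
-- what changed: Replaces the single stateful loop with a 'started' flag and break/continue by two plain phases: drop the leading preamble lines, then collect the contiguous run of comment lines.
import Mathlib
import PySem

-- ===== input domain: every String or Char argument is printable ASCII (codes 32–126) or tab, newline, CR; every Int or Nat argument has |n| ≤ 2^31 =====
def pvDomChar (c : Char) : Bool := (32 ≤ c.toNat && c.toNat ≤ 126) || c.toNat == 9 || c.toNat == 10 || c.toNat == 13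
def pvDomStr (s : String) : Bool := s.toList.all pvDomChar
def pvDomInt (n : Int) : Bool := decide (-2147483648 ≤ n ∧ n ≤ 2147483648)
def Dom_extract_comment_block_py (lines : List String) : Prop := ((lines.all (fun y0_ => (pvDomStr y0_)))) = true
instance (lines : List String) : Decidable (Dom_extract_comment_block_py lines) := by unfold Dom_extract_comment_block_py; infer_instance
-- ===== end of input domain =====

-- B replaces A's stateful loop (started flag + break/continue) by two plain phases: drop the preamble, then collect the comment run.

-- ===== PORT A =====
-- the preamble test shared verbatim by both ports (A writes it inline, B as helper _is_preamble)
def pvIsPreamble (s : String) : Bool :=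
  s == ""
    || PySem.Str.startswith s "#!"
    || PySem.Str.startswith (PySem.Str.lower s) "# -*-"
    || PySem.Str.startswith (PySem.Str.lower s) "# coding"

-- the for-loop of A: state = (accumulated desc_lines, started); 'break' = return acc
def pvALoop : List String → List String → Bool → List String
  | [], acc, _ => acc
  | line :: rest, acc, started =>
    let s := PySem.Str.strip line
    if !started && pvIsPreamble s then
      pvALoop rest acc started
    else if PySem.Str.startswith s "#" then
      pvALoop rest (acc ++ [PySem.Str.lstrip (PySem.Str.slice s (some 1) none)]) true
    else
      acc

def extract_comment_block_py (lines : List String) : Option String :=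
  let desc_lines := pvALoop lines [] false
  let desc := PySem.Str.join "\n" desc_lines
  if PySem.Str.strip desc ≠ "" then some desc else none

-- ===== PORT B =====
-- phase 1: 'while rest and _is_preamble(rest[0].strip()): rest = rest[1:]'
def pvSkip : List String → List String
  | [] => []
  | line :: rest =>
    if pvIsPreamble (PySem.Str.strip line) then pvSkip rest else line :: rest

-- phase 2: 'while rest and rest[0].strip().startswith("#"): parts.append(...)'
def pvCollect : List String → List String
  | [] => []
  | line :: rest =>
    if PySem.Str.startswith (PySem.Str.strip line) "#" then
      PySem.Str.lstrip (PySem.Str.slice (PySem.Str.strip line) (some 1) none) :: pvCollect rest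
    else
      []

def extract_comment_block_py_alt (lines : List String) : Option String :=
  let parts := pvCollect (pvSkip lines)
  let desc := PySem.Str.join "\n" parts
  if PySem.Str.strip desc ≠ "" then some desc else none

-- ===== PRECONDITION & SPEC =====
def Spec_extract_comment_block_py (lines : List String) (out : Option String) : Prop := out = extract_comment_block_py_alt lines
instance (lines : List String) (out : Option String) : Decidable (Spec_extract_comment_block_py lines out) := by unfold Spec_extract_comment_block_py; infer_instance

-- ===== CLAIM (what is proved, stated in full; the proofs are below) =====
def Claim_equal_extract_comment_block_py : Prop := ∀ (lines : List String), Dom_extract_comment_block_py lines → Spec_extract_comment_block_py lines (extract_comment_block_py lines)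

-- ===== LEMMAS AND PROOFS =====
-- once started, A's loop collects exactly the contiguous '#'-run of the remaining lines
theorem pvALoop_started (lines acc : List String) :
    pvALoop lines acc true = acc ++ pvCollect lines := by
  induction lines generalizing acc with
  | nil => simp [pvALoop, pvCollect]
  | cons line rest ih =>
    by_cases h : PySem.Chars.startswith (PySem.Chars.strip line.toList) ['#'] = true
    · simp [pvALoop, pvCollect, h, ih]
    · simp [pvALoop, pvCollect, h]

-- before starting, A's loop drops exactly the preamble prefix then collects
theorem pvALoop_not_started (lines acc : List String) :
    pvALoop lines acc false = acc ++ pvCollect (pvSkip lines) := by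
  induction lines generalizing acc with
  | nil => simp [pvALoop, pvSkip, pvCollect]
  | cons line rest ih =>
    by_cases hp : pvIsPreamble (PySem.Str.strip line) = true
    · simp [pvALoop, pvSkip, hp, ih]
    · by_cases h : PySem.Chars.startswith (PySem.Chars.strip line.toList) ['#'] = true
      · simp [pvALoop, pvSkip, pvCollect, hp, h, pvALoop_started]
      · simp [pvALoop, pvSkip, pvCollect, hp, h]

-- ===== VERDICT (by name: the statement is the Claim_ definition above) =====
theorem extract_comment_block_py_spec : Claim_equal_extract_comment_block_py := by
  intro lines _
  unfold Spec_extract_comment_block_py extract_comment_block_py extract_comment_block_py_alt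
  rw [pvALoop_not_started]
  simp
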